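-- pv_equiv track=rewrite | github.com/dishant-yadav/transvid-cli | video_qualities.py | get_all_compatible_quality
-- ===== SOURCE A (Python) =====
-- QUALITIES = [
--     { "quality": "2160p", "bitrate": 15000},
--     { "quality": "1080p", "bitrate": 8000 },
--     { "quality": "720p", "bitrate": 5000 },
--     { "quality": "480p", "bitrate": 1500 },
--     { "quality": "360p", "bitrate": 500 },
--     { "quality": "240p", "bitrate": 200 },
--     { "quality": "144p", "bitrate": 100 }
-- ]
--
-- def get_all_compatible_quality(quality):
--     bitrate=0
--     for i, q in enumerate(QUALITIES):
--         if q['quality'] == quality: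
--             bitrate=q['bitrate']
--
--     ans=[]
--     for i, q in enumerate(QUALITIES):
--         if q['bitrate'] <= bitrate:
--             ans.append(q["quality"])
--     return ans
-- ===== SOURCE B (Python) =====
-- QUALITIES = [
--     { "quality": "2160p", "bitrate": 15000},
--     { "quality": "1080p", "bitrate": 8000 },
--     { "quality": "720p", "bitrate": 5000 },
--     { "quality": "480p", "bitrate": 1500 },
--     { "quality": "360p", "bitrate": 500 },
--     { "quality": "240p", "bitrate": 200 },
--     { "quality": "144p", "bitrate": 100 }
-- ]
--
-- def get_all_compatible_quality(quality):
--     # QUALITIES is sorted strictly descending by bitrate, so the compatible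
--     # qualities are exactly the suffix starting at the selected name.
--     names = [q["quality"] for q in QUALITIES]
--     if quality in names:
--         return names[names.index(quality):]
--     return []
-- ===== Notes on version B (the rewrite author's own statement) =====
-- stated objective: simpler
-- what changed: Replaces the two enumerate passes (bitrate lookup then numeric threshold filter) with a name-position lookup and a tail slice of the name list, exploiting that QUALITIES is sorted strictly descending by bitrate.
import Mathlib
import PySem

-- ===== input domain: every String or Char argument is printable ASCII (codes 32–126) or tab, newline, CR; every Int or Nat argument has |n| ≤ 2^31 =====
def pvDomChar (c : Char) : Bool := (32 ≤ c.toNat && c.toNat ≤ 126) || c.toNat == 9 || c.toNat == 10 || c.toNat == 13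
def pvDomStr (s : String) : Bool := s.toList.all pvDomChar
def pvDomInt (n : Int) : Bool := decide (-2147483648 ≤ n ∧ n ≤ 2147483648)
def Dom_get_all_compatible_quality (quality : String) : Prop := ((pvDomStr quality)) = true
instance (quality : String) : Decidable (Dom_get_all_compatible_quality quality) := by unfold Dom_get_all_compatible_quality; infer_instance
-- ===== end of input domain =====

-- B is simpler: one name-position lookup and a tail slice instead of two filter passes,
-- exploiting that QUALITIES is sorted strictly descending by bitrate. Return values agree everywhere.

-- ===== PORT A =====
def QUALITIES : List (String × Int) :=
  [("2160p", 15000), ("1080p", 8000), ("720p", 5000), ("480p", 1500),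
   ("360p", 500), ("240p", 200), ("144p", 100)]

def get_all_compatible_quality (quality : String) : List String :=
  -- first loop: bitrate = last matching entry's bitrate (0 if none)
  let bitrate : Int := QUALITIES.foldl (fun b q => if q.1 == quality then q.2 else b) 0
  -- second loop: collect names with bitrate ≤ selected
  QUALITIES.foldl (fun ans q => if q.2 ≤ bitrate then ans ++ [q.1] else ans) []

-- ===== PORT B =====
def get_all_compatible_quality_alt (quality : String) : List String :=
  let names := QUALITIES.map (·.1)
  if quality ∈ names then
    match names.idxOf? quality with
    | some i => names.drop i
    | none => []
  else []

-- ===== PRECONDITION & SPEC =====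
def Spec_get_all_compatible_quality (quality : String) (out : List String) : Prop := out = get_all_compatible_quality_alt quality
instance (quality : String) (out : List String) : Decidable (Spec_get_all_compatible_quality quality out) := by unfold Spec_get_all_compatible_quality; infer_instance

-- ===== CLAIM (what is proved, stated in full; the proofs are below) =====
def Claim_equal_get_all_compatible_quality : Prop := ∀ (quality : String), Dom_get_all_compatible_quality quality → Spec_get_all_compatible_quality quality (get_all_compatible_quality quality)

-- ===== LEMMAS AND PROOFS =====

-- ===== VERDICT (by name: the statement is the Claim_ definition above) =====
theorem get_all_compatible_quality_spec : Claim_equal_get_all_compatible_quality := by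
  intro quality _
  unfold Spec_get_all_compatible_quality get_all_compatible_quality get_all_compatible_quality_alt QUALITIES
  rcases eq_or_ne quality "2160p" with h | h1
  · subst h; decide
  rcases eq_or_ne quality "1080p" with h | h2
  · subst h; decide
  rcases eq_or_ne quality "720p" with h | h3
  · subst h; decide
  rcases eq_or_ne quality "480p" with h | h4
  · subst h; decide
  rcases eq_or_ne quality "360p" with h | h5
  · subst h; decide
  rcases eq_or_ne quality "240p" with h | h6
  · subst h; decide
  rcases eq_or_ne quality "144p" with h | h7
  · subst h; decide
  simp [List.foldl, beq_iff_eq, Ne.symm h1, Ne.symm h2, Ne.symm h3, Ne.symm h4,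
    Ne.symm h5, Ne.symm h6, Ne.symm h7, h1, h2, h3, h4, h5, h6, h7]
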